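-- pv_equiv track=rewrite | github.com/JavierCabezas/genetic-sorting-flask | models/person.py | get_score_from_person_perspective
-- ===== SOURCE A (Python) =====
-- from typing import List, Dict, Optional
--
-- def get_score_from_person_perspective(
--     target_person_ids: List,
--     origin_person_preferences: Dict,
--     score_per_preference_dict: Dict
-- ) -> int:
--     total_score = 0
--     for id_preference_type in origin_person_preferences.keys():
--         prefered_person_id = origin_person_preferences[id_preference_type]
--         if prefered_person_id in target_person_ids:
--             total_score += score_per_preference_dict[id_preference_type]
--
--     return total_score
-- ===== SOURCE B (Python) =====
-- def get_score_from_person_perspective(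
--     target_person_ids,
--     origin_person_preferences,
--     score_per_preference_dict
-- ):
--     # Reverse index: preferred person id -> list of preference types naming it.
--     pref_by_person = {}
--     for id_preference_type, prefered_person_id in origin_person_preferences.items():
--         pref_by_person.setdefault(prefered_person_id, []).append(id_preference_type)
--     total_score = 0
--     for person_id in set(target_person_ids):
--         for t in pref_by_person.get(person_id, []):
--             total_score += score_per_preference_dict[t]
--     return total_score
-- ===== Notes on version B (the rewrite author's own statement) =====
-- stated objective: faster
-- what changed: B builds a reverse index from preferred person id to its preference types once, then sums scores by looking up each distinct target id in that index, instead of A's scan of all preferences with a membership test against the target list per preference.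
import Mathlib
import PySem

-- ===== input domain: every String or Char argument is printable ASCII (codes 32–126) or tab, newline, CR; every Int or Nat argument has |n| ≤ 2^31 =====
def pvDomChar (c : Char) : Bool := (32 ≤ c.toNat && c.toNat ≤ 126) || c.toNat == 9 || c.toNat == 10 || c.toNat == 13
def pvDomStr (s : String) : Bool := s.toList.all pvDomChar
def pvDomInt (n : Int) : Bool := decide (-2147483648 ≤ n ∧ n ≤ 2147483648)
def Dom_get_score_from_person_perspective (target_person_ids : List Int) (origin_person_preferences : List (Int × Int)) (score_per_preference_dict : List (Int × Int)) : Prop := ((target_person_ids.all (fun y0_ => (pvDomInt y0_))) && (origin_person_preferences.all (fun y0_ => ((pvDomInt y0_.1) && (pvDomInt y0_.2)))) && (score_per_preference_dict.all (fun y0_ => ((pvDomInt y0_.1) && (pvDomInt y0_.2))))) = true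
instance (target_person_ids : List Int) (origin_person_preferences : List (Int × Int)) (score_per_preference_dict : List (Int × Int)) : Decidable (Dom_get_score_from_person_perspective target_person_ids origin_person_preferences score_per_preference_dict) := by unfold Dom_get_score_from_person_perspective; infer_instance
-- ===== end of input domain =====

-- B replaces A's per-preference membership scan of the target list with a reverse index
-- (preferred person id -> its preference types) queried once per distinct target id (objective: alternative).

-- ===== PORT A =====
def get_score_from_person_perspective (target_person_ids : List Int) (origin_person_preferences : List (Int × Int)) (score_per_preference_dict : List (Int × Int)) : Int :=
  let prefsD := PySem.Dict.ofList origin_person_preferences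
  let scoresD := PySem.Dict.ofList score_per_preference_dict
  prefsD.keys.foldl (fun total_score id_preference_type =>
    let prefered_person_id := prefsD.getD id_preference_type 0
    if target_person_ids.contains prefered_person_id then
      total_score + scoresD.getD id_preference_type 0
    else total_score) 0

-- ===== PORT B =====
def get_score_from_person_perspective_alt (target_person_ids : List Int) (origin_person_preferences : List (Int × Int)) (score_per_preference_dict : List (Int × Int)) : Int :=
  let prefsD := PySem.Dict.ofList origin_person_preferences
  let scoresD := PySem.Dict.ofList score_per_preference_dict
  let pref_by_person := prefsD.items.foldl (fun d p => d.modify p.2 [] (· ++ [p.1])) PySem.Dict.empty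
  (PySem.Set.ofList target_person_ids).foldl (fun total_score person_id =>
    (pref_by_person.getD person_id []).foldl (fun total_score t =>
      total_score + scoresD.getD t 0) total_score) 0

-- ===== PRECONDITION & SPEC =====
-- Pre_ excludes exactly the inputs on which Python A raises KeyError: some preference whose
-- preferred person id is in the target list has a preference type absent from the score dict.
def Pre_get_score_from_person_perspective (target_person_ids : List Int) (origin_person_preferences : List (Int × Int)) (score_per_preference_dict : List (Int × Int)) : Prop :=
  ∀ p ∈ (PySem.Dict.ofList origin_person_preferences).items,
    p.2 ∈ target_person_ids → p.1 ∈ (PySem.Dict.ofList score_per_preference_dict).keys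
instance (target_person_ids : List Int) (origin_person_preferences : List (Int × Int)) (score_per_preference_dict : List (Int × Int)) : Decidable (Pre_get_score_from_person_perspective target_person_ids origin_person_preferences score_per_preference_dict) := by unfold Pre_get_score_from_person_perspective; infer_instance
def pvWitness_get_score_from_person_perspective : List Int × (List (Int × Int)) × (List (Int × Int)) := ([1, 2], [(10, 1), (11, 3)], [(10, 5), (11, 7)])

def Spec_get_score_from_person_perspective (target_person_ids : List Int) (origin_person_preferences : List (Int × Int)) (score_per_preference_dict : List (Int × Int)) (out : Int) : Prop := out = get_score_from_person_perspective_alt target_person_ids origin_person_preferences score_per_preference_dict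
instance (target_person_ids : List Int) (origin_person_preferences : List (Int × Int)) (score_per_preference_dict : List (Int × Int)) (out : Int) : Decidable (Spec_get_score_from_person_perspective target_person_ids origin_person_preferences score_per_preference_dict out) := by unfold Spec_get_score_from_person_perspective; infer_instance

-- ===== CLAIM (what is proved, stated in full; the proofs are below) =====
def Claim_equal_get_score_from_person_perspective : Prop := ∀ (target_person_ids : List Int) (origin_person_preferences : List (Int × Int)) (score_per_preference_dict : List (Int × Int)), Dom_get_score_from_person_perspective target_person_ids origin_person_preferences score_per_preference_dict → Pre_get_score_from_person_perspective target_person_ids origin_person_preferences score_per_preference_dict → Spec_get_score_from_person_perspective target_person_ids origin_person_preferences score_per_preference_dict (get_score_from_person_perspective target_person_ids origin_person_preferences score_per_preference_dict)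

-- ===== LEMMAS AND PROOFS =====
-- A conditional-accumulation loop is a sum of 0/if terms.
theorem pv_foldl_if_add {α : Type} (c : α → Bool) (f : α → Int) :
    ∀ (l : List α) (init : Int),
      l.foldl (fun a x => if c x then a + f x else a) init
        = init + (l.map (fun x => if c x then f x else 0)).sum := by
  intro l
  induction l with
  | nil => simp
  | cons x l ih =>
    intro init
    by_cases h : c x = true <;> simp [h, ih, add_assoc]

-- A plain accumulation loop is init + sum.
theorem pv_foldl_add {α : Type} (f : α → Int) :
    ∀ (l : List α) (init : Int),
      l.foldl (fun a x => a + f x) init = init + (l.map f).sum := by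
  intro l
  induction l with
  | nil => simp
  | cons x l ih => intro init; simp [ih, add_assoc]

-- Summing a one-hot indicator over a Nodup list collapses to a single if.
theorem pv_sum_onehot (v : Int) (c : Int) :
    ∀ (S : List Int), S.Nodup →
      (S.map (fun pid => if v == pid then c else 0)).sum = if v ∈ S then c else 0 := by
  intro S
  induction S with
  | nil => simp
  | cons s S ih =>
    intro hnd
    simp only [List.nodup_cons] at hnd
    by_cases h : v = s
    · subst h
      simp only [List.map_cons, List.sum_cons, ih hnd.2]
      simp [hnd.1]
    · simp only [List.map_cons, List.sum_cons, ih hnd.2]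
      simp [h, beq_iff_eq]

-- Exchange of summation: grouping by key then summing over distinct keys equals one filtered pass.
theorem pv_group_sum (f : Int → Int) (S : List Int) (hnd : S.Nodup) :
    ∀ (l : List (Int × Int)),
      (S.map (fun pid => ((l.filter (fun p => p.2 == pid)).map (fun p => f p.1)).sum)).sum
        = (l.map (fun p => if p.2 ∈ S then f p.1 else 0)).sum := by
  intro l
  induction l with
  | nil => simp
  | cons p l ih =>
    have step : ∀ pid : Int,
        (((p :: l).filter (fun q => q.2 == pid)).map (fun q => f q.1)).sum
          = (if p.2 == pid then f p.1 else 0)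
            + ((l.filter (fun q => q.2 == pid)).map (fun q => f q.1)).sum := by
      intro pid
      by_cases h : p.2 = pid <;> simp [h]
    simp only [step]
    rw [PySem.List.sum_map_add_int, ih, pv_sum_onehot p.2 (f p.1) S hnd]
    simp

-- The reverse-index fold, read back at any key, is the filtered list of preference types.
theorem pv_idx_getD (l : List (Int × Int)) (pid : Int) :
    (l.foldl (fun d p => d.modify p.2 [] (· ++ [p.1])) PySem.Dict.empty).getD pid []
      = (l.filter (fun p => p.2 == pid)).map (fun p => p.1) := by
  have h : l.foldl (fun d p => d.modify p.2 [] (· ++ [p.1])) PySem.Dict.empty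
      = (l.map Prod.swap).foldl (fun d p => d.modify p.1 [] (· ++ [p.2])) PySem.Dict.empty := by
    simp only [List.foldl_map, Prod.fst_swap, Prod.snd_swap]
  rw [h, PySem.Dict.getD_foldl_modify_append]
  simp [List.filter_map, Function.comp_def, List.map_map, Prod.swap]


-- ===== VERDICT (by name: the statement is the Claim_ definition above) =====
theorem get_score_from_person_perspective_spec : Claim_equal_get_score_from_person_perspective := by
  intro T P S _ _
  unfold Spec_get_score_from_person_perspective
  unfold get_score_from_person_perspective get_score_from_person_perspective_alt
  simp only [pv_foldl_add, pv_foldl_if_add, pv_idx_getD, List.map_map, Function.comp_def, zero_add]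
  rw [pv_group_sum (fun t => (PySem.Dict.ofList S).getD t 0) (PySem.Set.ofList T)
        (PySem.Set.nodup_ofList T)]
  rw [PySem.Dict.items_eq_map_keys (PySem.Dict.ofList P) (PySem.Dict.nodup_keys_ofList P) 0,
      List.map_map]
  simp [Function.comp_def, PySem.Set.mem_ofList]
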